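-- pv_equiv track=rewrite | github.com/shalomori123/self.py | count numbers 7.2.2.py | numbers_letters_count
-- ===== SOURCE A (Python) =====
-- def numbers_letters_count(my_str):
-- 	my_list = [0, 0]
-- 	for i in my_str:
-- 		if i.isnumeric():
-- 			my_list[0] += 1
-- 		else:
-- 			my_list[1] += 1
-- 	return my_list
-- ===== SOURCE B (Python) =====
-- def numbers_letters_count(my_str):
-- 	n = len(my_str)
-- 	if n == 0:
-- 		return [0, 0]
-- 	if n == 1:
-- 		return [1, 0] if my_str.isnumeric() else [0, 1]
-- 	mid = n // 2
-- 	left = numbers_letters_count(my_str[:mid])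
-- 	right = numbers_letters_count(my_str[mid:])
-- 	return [left[0] + right[0], left[1] + right[1]]
-- ===== Notes on version B (the rewrite author's own statement) =====
-- stated objective: alternative
-- what changed: Replaces A's single linear pass with two branch-updated counters by a divide-and-conquer recursion: split the string in half, recurse on each half, and add the resulting count vectors, with base cases for the empty and one-character string.
import Mathlib
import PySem

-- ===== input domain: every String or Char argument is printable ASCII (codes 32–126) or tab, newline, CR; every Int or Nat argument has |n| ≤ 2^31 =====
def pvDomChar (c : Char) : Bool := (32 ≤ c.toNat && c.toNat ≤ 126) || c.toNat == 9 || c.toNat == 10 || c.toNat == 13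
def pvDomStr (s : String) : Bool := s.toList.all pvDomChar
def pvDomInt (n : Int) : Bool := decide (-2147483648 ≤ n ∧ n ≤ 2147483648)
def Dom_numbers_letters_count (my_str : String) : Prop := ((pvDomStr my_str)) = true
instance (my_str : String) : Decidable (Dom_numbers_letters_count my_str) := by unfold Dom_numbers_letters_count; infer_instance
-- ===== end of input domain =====

-- B replaces A's single linear pass with two branch-updated counters by a divide-and-conquer
-- recursion: split in half, recurse, add the two count vectors (objective: alternative).
-- '.isnumeric()' is ported as PySem.Chars.isdigit, exact on the ASCII domain where the two coincide.

-- ===== PORT A =====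
def numbers_letters_count (my_str : String) : List Int :=
  let p := my_str.toList.foldl
    (fun (acc : Int × Int) i =>
      if PySem.Chars.isdigit i then (acc.1 + 1, acc.2) else (acc.1, acc.2 + 1))
    (0, 0)
  [p.1, p.2]

-- ===== PORT B =====
-- Source B's recursion over the string, on its character list (slices = take/drop at n//2);
-- the one-character base case tests the whole one-char string with .isnumeric(), which on a
-- single character is isdigit of that character (headI).
def nlcGo (l : List Char) : List Int :=
  let n := l.length
  if n = 0 then [0, 0]
  else if n = 1 then (if PySem.Chars.isdigit l.headI then [1, 0] else [0, 1])
  else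
    let left := nlcGo (l.take (n / 2))
    let right := nlcGo (l.drop (n / 2))
    [left.headI + right.headI, left.getD 1 0 + right.getD 1 0]
termination_by l.length
decreasing_by
  · simp only [List.length_take]; omega
  · simp only [List.length_drop]; omega

def numbers_letters_count_alt (my_str : String) : List Int :=
  nlcGo my_str.toList

-- ===== PRECONDITION & SPEC =====
def Spec_numbers_letters_count (my_str : String) (out : List Int) : Prop := out = numbers_letters_count_alt my_str
instance (my_str : String) (out : List Int) : Decidable (Spec_numbers_letters_count my_str out) := by unfold Spec_numbers_letters_count; infer_instance

-- ===== CLAIM (what is proved, stated in full; the proofs are below) =====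
def Claim_equal_numbers_letters_count : Prop := ∀ (my_str : String), Dom_numbers_letters_count my_str → Spec_numbers_letters_count my_str (numbers_letters_count my_str)

-- ===== LEMMAS AND PROOFS =====

-- number of numeric characters of l, as an Int
def pvCnt (l : List Char) : Int := ((l.filter (fun c => PySem.Chars.isdigit c)).length : Int)

theorem pv_fold_char (l : List Char) (a b : Int) :
    l.foldl (fun (acc : Int × Int) i =>
      if PySem.Chars.isdigit i then (acc.1 + 1, acc.2) else (acc.1, acc.2 + 1)) (a, b)
    = (a + pvCnt l, b + ((l.length : Int) - pvCnt l)) := by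
  induction l generalizing a b with
  | nil => simp [pvCnt]
  | cons c t ih =>
    by_cases h : PySem.Chars.isdigit c
    · simp [h, ih, pvCnt]; omega
    · simp [h, ih, pvCnt]; omega

theorem pv_nlcGo_eq (l : List Char) :
    nlcGo l = [pvCnt l, (l.length : Int) - pvCnt l] := by
  induction hn : l.length using Nat.strong_induction_on generalizing l with
  | _ n ih =>
    subst hn
    rw [nlcGo]
    by_cases h0 : l.length = 0
    · simp [List.eq_nil_of_length_eq_zero h0, pvCnt]
    · by_cases h1 : l.length = 1
      · obtain ⟨c, rfl⟩ : ∃ c, l = [c] := by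
          match l, h1 with | [c], _ => exact ⟨c, rfl⟩
        by_cases h : PySem.Chars.isdigit c <;> simp [h1, h, pvCnt]
      · have hlt : l.length / 2 < l.length := by omega
        have hdlt : l.length - l.length / 2 < l.length := by omega
        have hcnt : (List.filter (fun c => PySem.Chars.isdigit c) (l.take (l.length / 2))).length
            + (List.filter (fun c => PySem.Chars.isdigit c) (l.drop (l.length / 2))).length
            = (List.filter (fun c => PySem.Chars.isdigit c) l).length := by
          conv_rhs => rw [← List.take_append_drop (l.length / 2) l]
          rw [List.filter_append, List.length_append]
        rw [if_neg h0, if_neg h1]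
        rw [ih (l.length / 2) hlt (l.take (l.length / 2)) (by simp [List.length_take]; omega),
            ih (l.length - l.length / 2) hdlt (l.drop (l.length / 2)) (by simp)]
        simp only [List.headI, List.getD, List.getElem?_cons_succ, List.getElem?_cons_zero,
          Option.getD_some, pvCnt]
        have h2 : ((l.length : Int)) = ((l.length / 2 : Nat) : Int) + ((l.length - l.length / 2 : Nat) : Int) := by omega
        rw [List.cons_eq_cons, List.cons_eq_cons]
        refine ⟨by omega, by omega, rfl⟩

-- ===== VERDICT (by name: the statement is the Claim_ definition above) =====
theorem numbers_letters_count_spec : Claim_equal_numbers_letters_count := by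
  intro s _
  unfold Spec_numbers_letters_count numbers_letters_count numbers_letters_count_alt
  rw [pv_nlcGo_eq, pv_fold_char]
  simp
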